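-- pv_equiv track=rewrite | github.com/ajay-1110/Python-Coderbyte-Challenges | String Challenges/ascii_conversion.py | asci
-- ===== SOURCE A (Python) =====
-- def asci(strn):
--     a = strn.lower()
--     b = ''
--     for i in a:
--         if i != ' ':
--             x = ord(i)
--             b += str(x)
--         else:
--             b += ' '
--     return b
-- ===== SOURCE B (Python) =====
-- def asci(strn):
--     words = strn.lower().split(' ')
--     return ' '.join(''.join(str(ord(c)) for c in w) for w in words)
-- ===== Notes on version B (the rewrite author's own statement) =====
-- stated objective: idiomatic
-- what changed: Replaces the flat per-character loop with its space branch by splitting the lowercased input on the single-space separator into word tokens, converting each word by concatenating str(ord(c)), and rejoining the converted words with the same separator, so spaces are handled structurally by the split/join boundaries.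
import Mathlib
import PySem

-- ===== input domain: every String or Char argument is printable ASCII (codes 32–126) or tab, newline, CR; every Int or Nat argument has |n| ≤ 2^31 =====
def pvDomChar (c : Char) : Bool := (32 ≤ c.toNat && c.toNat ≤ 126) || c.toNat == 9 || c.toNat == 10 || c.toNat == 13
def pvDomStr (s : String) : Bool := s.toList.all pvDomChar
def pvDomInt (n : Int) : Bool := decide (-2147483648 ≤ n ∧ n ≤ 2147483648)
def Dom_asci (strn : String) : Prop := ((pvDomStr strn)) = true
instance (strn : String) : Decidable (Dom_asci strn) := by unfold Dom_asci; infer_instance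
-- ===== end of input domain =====

-- B lowercases, splits on the single-space separator into word tokens, converts each word, and rejoins with that separator (same cost, different decomposition).


-- ===== PORT A =====
def asci (strn : String) : String :=
  let a := PySem.Chars.lower strn.toList
  String.ofList (a.foldl
    (fun b i => if i ≠ ' ' then b ++ PySem.Int.toChars (i.toNat : Int) else b ++ [' ']) [])

-- ===== PORT B =====
def asci_alt (strn : String) : String :=
  let words := PySem.Chars.splitOn (PySem.Chars.lower strn.toList) [' ']
  String.ofList (PySem.Chars.join [' ']
    (words.map (fun w => PySem.Chars.join [] (w.map (fun c => PySem.Int.toChars (c.toNat : Int))))))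

-- ===== PRECONDITION & SPEC =====
def Spec_asci (strn : String) (out : String) : Prop := out = asci_alt strn
instance (strn : String) (out : String) : Decidable (Spec_asci strn out) := by unfold Spec_asci; infer_instance

-- ===== CLAIM (what is proved, stated in full; the proofs are below) =====
def Claim_equal_asci : Prop := ∀ (strn : String), Dom_asci strn → Spec_asci strn (asci strn)

-- ===== LEMMAS AND PROOFS =====

-- structural single-character split, matched to PySem.Chars.splitOn.go below
def spSplit (c : Char) : List Char → List (List Char)
  | [] => [[]]
  | a :: rest => if a = c then [] :: spSplit c rest
      else (a :: (spSplit c rest).headI) :: (spSplit c rest).tail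

theorem spSplit_ne_nil (c : Char) (l : List Char) : spSplit c l ≠ [] := by
  cases l with
  | nil => simp [spSplit]
  | cons a rest =>
    simp only [spSplit]
    split_ifs
    · simp
    · simp

theorem go_eq_spSplit (c : Char) (fuel : Nat) (l cur : List Char) (acc : List (List Char))
    (h : l.length < fuel) :
    PySem.Chars.splitOn.go [c] fuel l cur acc
      = acc.reverse ++ (spSplit c l).modifyHead (fun w => cur.reverse ++ w) := by
  induction fuel generalizing l cur acc with
  | zero => omega
  | succ fuel ih =>
    cases l with
    | nil =>
      simp [PySem.Chars.splitOn.go, spSplit]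
    | cons a rest =>
      simp only [PySem.Chars.splitOn.go]
      by_cases hac : a = c
      · subst hac
        have hp : List.isPrefixOf [a] (a :: rest) = true := by
          simp [List.isPrefixOf]
        rw [if_pos hp]
        have := ih rest [] (cur.reverse :: acc) (by simpa using Nat.lt_of_succ_lt_succ h)
        simp at this
        rw [show List.drop (List.length [a]) (a :: rest) = rest by simp, this]
        cases hsp : spSplit a rest with
        | nil => exact absurd hsp (spSplit_ne_nil a rest)
        | cons h t => simp [spSplit, hsp]
      · have hp : List.isPrefixOf [c] (a :: rest) = false := by
          simp [List.isPrefixOf]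
          exact fun hc => absurd hc.symm hac
        rw [if_neg (by simp [hp])]
        have := ih rest (a :: cur) acc (by simpa using Nat.lt_of_succ_lt_succ h)
        rw [this]
        simp only [spSplit, if_neg hac]
        cases hsp : spSplit c rest with
        | nil => exact absurd hsp (spSplit_ne_nil c rest)
        | cons h t => simp

theorem splitOn_eq_spSplit (c : Char) (l : List Char) :
    PySem.Chars.splitOn l [c] = spSplit c l := by
  unfold PySem.Chars.splitOn
  rw [go_eq_spSplit c (l.length + 1) l [] [] (by omega)]
  cases hsp : spSplit c l with
  | nil => exact absurd hsp (spSplit_ne_nil c l)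
  | cons h t => simp

-- the word-conversion functions, list-side
def convWord (w : List Char) : List Char := w.flatMap (fun c => PySem.Int.toChars (c.toNat : Int))
def convChar (i : Char) : List Char := if i ≠ ' ' then PySem.Int.toChars (i.toNat : Int) else [' ']

theorem join_map_spSplit (cs : List Char) :
    PySem.Chars.join [' '] ((spSplit ' ' cs).map convWord) = cs.flatMap convChar := by
  induction cs with
  | nil => simp [spSplit, convWord, PySem.Chars.join_singleton]
  | cons a rest ih =>
    by_cases ha : a = ' '
    · subst ha
      rw [show spSplit ' ' (' ' :: rest) = [] :: spSplit ' ' rest by simp [spSplit],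
        List.map_cons]
      cases hsp : (spSplit ' ' rest).map convWord with
      | nil => exact absurd (List.map_eq_nil_iff.mp hsp) (spSplit_ne_nil ' ' rest)
      | cons h t =>
        simp only [hsp] at ih ⊢
        rw [PySem.Chars.join_cons_cons]
        simp [ih, convWord, convChar]
    · rw [show spSplit ' ' (a :: rest)
          = (a :: (spSplit ' ' rest).headI) :: (spSplit ' ' rest).tail by
            simp [spSplit, ha]]
      cases hsp : spSplit ' ' rest with
      | nil => exact absurd hsp (spSplit_ne_nil ' ' rest)
      | cons h t =>
        rw [hsp, List.map_cons] at ih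
        have hconv : convWord (a :: h) = convChar a ++ convWord h := by
          simp [convWord, convChar, ha]
        cases t with
        | nil =>
          simp only [List.headI, List.tail, List.map_cons, List.map_nil] at ih ⊢
          rw [PySem.Chars.join_singleton] at ih ⊢
          simp [hconv, ih, convChar]
        | cons y t' =>
          simp only [List.headI, List.tail, List.map_cons] at ih ⊢
          rw [PySem.Chars.join_cons_cons] at ih ⊢
          simp only [List.flatMap_cons, ← List.append_assoc, hconv, ← ih]

theorem join_nil_eq_flatMap (g : Char → List Char) (w : List Char) :
    PySem.Chars.join [] (w.map g) = w.flatMap g := by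
  induction w with
  | nil => simp [PySem.Chars.join_nil]
  | cons a rest ih =>
    cases rest with
    | nil => simp [PySem.Chars.join_singleton]
    | cons b t =>
      simp only [List.map_cons] at ih ⊢
      rw [PySem.Chars.join_cons_cons, ih]
      simp

-- ===== VERDICT (by name: the statement is the Claim_ definition above) =====
theorem asci_spec : Claim_equal_asci := by
  intro strn _
  unfold Spec_asci asci asci_alt
  simp only
  congr 1
  have hfun : (fun (b : List Char) i =>
        if i ≠ ' ' then b ++ PySem.Int.toChars (i.toNat : Int) else b ++ [' '])
      = (fun (b : List Char) i => b ++ convChar i) := by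
    funext b i
    unfold convChar
    split_ifs <;> rfl
  rw [hfun, PySem.List.foldl_append_eq_flatMap, List.nil_append,
    splitOn_eq_spSplit, ← join_map_spSplit]
  congr 1
  apply List.map_congr_left
  intro w _
  rw [join_nil_eq_flatMap, convWord]
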